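-- pv_equiv track=rewrite | github.com/Sarthakischauhan/advent-of-code | 2025/day1.py | part2
-- ===== SOURCE A (Python) =====
-- def part2(moves, start=50, dial_size=100):
--     pos = start     # current dial position in [0..dial_size-1]
--     count = 0
--     unwrapped = start   # track “absolute” position before modulo
--
--     for instr in moves:
--         steps = int(instr[1:])
--         if instr[0] == 'R':
--             unwrapped += steps
--             count += unwrapped // dial_size - ( (unwrapped - steps) // dial_size )
--         else:  # 'L'
--             unwrapped -= steps
--             # When moving left, crossing zero corresponds to going past a multiple of dial_size downward
--             # Compute how many multiples of dial_size we passed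
--             prev_cycle = (unwrapped + steps + (dial_size - 1)) // dial_size
--             new_cycle = (unwrapped + (dial_size - 1)) // dial_size
--             count += prev_cycle - new_cycle
--
--         pos = unwrapped % dial_size
--         # If we ended exactly on 0, that landing is already counted by the wrap logic above
--
--     return count
-- ===== SOURCE B (Python) =====
-- def part2(moves, start=50, dial_size=100):
--     # Unit-step simulation: turn the dial one tick at a time and count every
--     # tick that lands on position 0 (i.e. on a multiple of dial_size).
--     count = 0
--     pos = start % dial_size
--     for instr in moves:
--         steps = int(instr[1:])
--         delta = 1 if instr[0] == 'R' else -1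
--         for _ in range(steps):
--             pos = (pos + delta) % dial_size
--             if pos == 0:
--                 count += 1
--     return count
-- ===== Notes on version B (the rewrite author's own statement) =====
-- stated objective: simpler
-- what changed: B replaces A's per-move floor/ceil crossing arithmetic on an unbounded 'unwrapped' counter by a direct unit-step simulation: it turns the dial one tick at a time (delta = +1/-1) keeping only the reduced position, and counts every tick that lands on position 0; no floor-division bookkeeping at all.
-- outside the precondition, e.g. on part2(['R-3'], 0, 10): A returns -1, B returns 0; on part2(['L25', 'L14'], 0, -38): A returns -1, B returns 1; on part2([], 0, 0): A returns 0, B raises ZeroDivisionError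
import Mathlib
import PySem

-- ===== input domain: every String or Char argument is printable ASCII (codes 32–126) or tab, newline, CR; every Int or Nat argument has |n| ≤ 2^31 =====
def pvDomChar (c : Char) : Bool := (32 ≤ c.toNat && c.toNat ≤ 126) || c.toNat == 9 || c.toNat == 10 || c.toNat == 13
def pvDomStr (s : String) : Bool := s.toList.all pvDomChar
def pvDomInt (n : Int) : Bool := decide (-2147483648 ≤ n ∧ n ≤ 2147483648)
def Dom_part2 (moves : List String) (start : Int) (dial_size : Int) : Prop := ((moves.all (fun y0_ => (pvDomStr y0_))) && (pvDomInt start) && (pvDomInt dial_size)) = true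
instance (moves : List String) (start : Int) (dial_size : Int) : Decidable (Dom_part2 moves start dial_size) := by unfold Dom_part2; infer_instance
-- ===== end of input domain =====

-- B replaces A's per-move floor/ceil crossing arithmetic by a unit-step simulation of the
-- dial (one tick at a time, count each landing on 0); simpler to see correct, slower on big steps.

-- ===== PORT A =====
-- steps = int(instr[1:]): under Pre_ the parse succeeds; .getD 0 is never the taken value inside Pre_.
def part2 (moves : List String) (start : Int) (dial_size : Int) : Int :=
  -- state (pos, count, unwrapped), exactly A's three variables
  (moves.foldl (fun (st : Int × Int × Int) instr =>
      let steps := (PySem.Int.ofStr? (PySem.Str.slice instr (some 1) none)).getD 0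
      if PySem.Str.pyGet? instr 0 = some 'R' then
        let u := st.2.2 + steps
        (PySem.Int.mod u dial_size,
         st.2.1 + (PySem.Int.floordiv u dial_size - PySem.Int.floordiv (u - steps) dial_size),
         u)
      else
        let u := st.2.2 - steps
        let prev_cycle := PySem.Int.floordiv (u + steps + (dial_size - 1)) dial_size
        let new_cycle := PySem.Int.floordiv (u + (dial_size - 1)) dial_size
        (PySem.Int.mod u dial_size, st.2.1 + (prev_cycle - new_cycle), u))
    (start, 0, start)).2.1

-- ===== PORT B =====
def part2_alt (moves : List String) (start : Int) (dial_size : Int) : Int :=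
  -- state (count, pos); inner fold = 'for _ in range(steps)' unit-tick loop
  (moves.foldl (fun (st : Int × Int) instr =>
      let steps := (PySem.Int.ofStr? (PySem.Str.slice instr (some 1) none)).getD 0
      let delta : Int := if PySem.Str.pyGet? instr 0 = some 'R' then 1 else -1
      (List.range steps.toNat).foldl (fun (st : Int × Int) _ =>
          let p := PySem.Int.mod (st.2 + delta) dial_size
          (if p = 0 then st.1 + 1 else st.1, p)) st)
    (0, PySem.Int.mod start dial_size)).1

-- ===== PRECONDITION & SPEC =====
-- Pre_ restricts to the natural domain: 0 < dial_size (a dial has a positive number of positions;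
-- for dial_size = 0 A raises ZeroDivisionError and B raises it even on [] moves, and for
-- dial_size < 0 A's value is an artefact of floor division by a negative divisor), and every
-- instruction's tail must parse as a NONNEGATIVE int (a failed parse raises ValueError in both;
-- a negative step count like "R-3" is not a meaningful move and A counts negative wraps there).
def Pre_part2 (moves : List String) (start : Int) (dial_size : Int) : Prop :=
  0 < dial_size ∧ ∀ m ∈ moves, 0 ≤ (PySem.Int.ofStr? (PySem.Str.slice m (some 1) none)).getD (-1)
instance (moves : List String) (start : Int) (dial_size : Int) : Decidable (Pre_part2 moves start dial_size) := by unfold Pre_part2; infer_instance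

def pvWitness_part2 : List String × Int × Int := (["R50", "L120", "R1000"], 50, 100)

def Spec_part2 (moves : List String) (start : Int) (dial_size : Int) (out : Int) : Prop := out = part2_alt moves start dial_size
instance (moves : List String) (start : Int) (dial_size : Int) (out : Int) : Decidable (Spec_part2 moves start dial_size out) := by unfold Spec_part2; infer_instance

-- ===== CLAIM (what is proved, stated in full; the proofs are below) =====
def Claim_equal_part2 : Prop := ∀ (moves : List String) (start : Int) (dial_size : Int), Dom_part2 moves start dial_size → Pre_part2 moves start dial_size → Spec_part2 moves start dial_size (part2 moves start dial_size)

-- ===== LEMMAS AND PROOFS =====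

theorem pv_fd_bounds (a d : Int) (hd : 0 < d) :
    PySem.Int.floordiv a d * d ≤ a ∧ a < (PySem.Int.floordiv a d + 1) * d :=
  (PySem.Int.floordiv_eq_iff_of_pos hd).mp rfl

-- floor((x + q*d)/d) = floor(x/d) + q
theorem pv_fd_shift (d : Int) (hd : 0 < d) (x q : Int) :
    PySem.Int.floordiv (x + q * d) d = PySem.Int.floordiv x d + q := by
  obtain ⟨h1, h2⟩ := pv_fd_bounds x d hd
  rw [PySem.Int.floordiv_eq_iff_of_pos hd]
  constructor <;> nlinarith

-- floor((x + d - 1)/d) = -floor((-x)/d)   (ceiling division)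
theorem pv_fd_ceil (d : Int) (hd : 0 < d) (x : Int) :
    PySem.Int.floordiv (x + d - 1) d = -(PySem.Int.floordiv (-x) d) := by
  obtain ⟨h1, h2⟩ := pv_fd_bounds (-x) d hd
  rw [PySem.Int.floordiv_eq_iff_of_pos hd]
  constructor <;> nlinarith

theorem pv_fd_small (d : Int) (hd : 0 < d) (p : Int) (h0 : 0 ≤ p) (h1 : p < d) :
    PySem.Int.floordiv p d = 0 := by
  rw [PySem.Int.floordiv_eq_iff_of_pos hd]; constructor <;> nlinarith

theorem pv_mod_shift (d : Int) (hd : 0 < d) (x q : Int) :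
    PySem.Int.mod (x + q * d) d = PySem.Int.mod x d := by
  have h1 := PySem.Int.floordiv_mul_add_mod x d
  have h2 := PySem.Int.floordiv_mul_add_mod (x + q * d) d
  rw [pv_fd_shift d hd x q] at h2
  nlinarith

theorem pv_mod_small (d : Int) (hd : 0 < d) (p : Int) (h0 : 0 ≤ p) (h1 : p < d) :
    PySem.Int.mod p d = p := by
  have h := PySem.Int.floordiv_mul_add_mod p d
  rw [pv_fd_small d hd p h0 h1] at h; linarith

-- the landing indicator of one tick equals a floor-division difference
theorem pv_ind (d : Int) (hd : 0 < d) (z : Int) :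
    (if PySem.Int.mod z d = 0 then (1 : Int) else 0)
      = PySem.Int.floordiv z d - PySem.Int.floordiv (z - 1) d := by
  by_cases h : PySem.Int.mod z d = 0
  · have hz := PySem.Int.floordiv_mul_add_mod z d
    rw [h] at hz
    have hm1 : PySem.Int.floordiv (-1) d = -1 := by
      rw [PySem.Int.floordiv_eq_iff_of_pos hd]; constructor <;> nlinarith
    have : PySem.Int.floordiv (z - 1) d = PySem.Int.floordiv z d - 1 := by
      rw [show z - 1 = -1 + PySem.Int.floordiv z d * d by linarith,
          pv_fd_shift d hd, hm1]; ring
    simp [h, this]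
  · have h0 : 0 ≤ PySem.Int.mod z d := PySem.Int.mod_nonneg z hd
    have h1 : PySem.Int.mod z d < d := PySem.Int.mod_lt z hd
    have hz := PySem.Int.floordiv_mul_add_mod z d
    have : PySem.Int.floordiv (z - 1) d = PySem.Int.floordiv z d := by
      rw [show z - 1 = (PySem.Int.mod z d - 1) + PySem.Int.floordiv z d * d by linarith,
          pv_fd_shift d hd, pv_fd_small d hd (PySem.Int.mod z d - 1) (by omega) (by omega)]
      ring
    simp [h, this]

theorem pv_mod_zero_neg (d : Int) (hd : 0 < d) (z : Int) :
    (PySem.Int.mod z d = 0) ↔ (PySem.Int.mod (-z) d = 0) := by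
  rw [PySem.Int.mod_eq_zero_iff_dvd, PySem.Int.mod_eq_zero_iff_dvd]
  exact ⟨fun h => h.neg_right, fun h => by simpa using h.neg_right⟩

-- the unit-tick loop, moving right: counts floor((p+n)/d), ends at (p+n) mod d
theorem pv_ticksR (d : Int) (hd : 0 < d) :
    ∀ (n : Nat) (c p : Int), 0 ≤ p → p < d →
      (List.range n).foldl (fun (st : Int × Int) _ =>
          let q := PySem.Int.mod (st.2 + 1) d
          (if q = 0 then st.1 + 1 else st.1, q)) (c, p)
        = (c + PySem.Int.floordiv (p + n) d, PySem.Int.mod (p + n) d) := by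
  intro n
  induction n with
  | zero =>
    intro c p h0 h1
    simp [pv_fd_small d hd p h0 h1, pv_mod_small d hd p h0 h1]
  | succ n ih =>
    intro c p h0 h1
    rw [List.range_succ, List.foldl_append, ih c p h0 h1]
    simp only [List.foldl_cons, List.foldl_nil]
    have hc : ((n + 1 : Nat) : Int) = (n : Int) + 1 := by push_cast; ring
    rw [hc]
    have hmod : PySem.Int.mod (PySem.Int.mod (p + n) d + 1) d
        = PySem.Int.mod (p + ((n : Int) + 1)) d := by
      have h := PySem.Int.floordiv_mul_add_mod (p + n) d
      rw [show PySem.Int.mod (p + (n : Int)) d + 1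
            = (p + ((n : Int) + 1)) + (-(PySem.Int.floordiv (p + n) d)) * d by linarith,
          pv_mod_shift d hd]
    have hcnt := pv_ind d hd (p + ((n : Int) + 1))
    rw [show p + ((n : Int) + 1) - 1 = p + n by ring] at hcnt
    rw [hmod]
    by_cases h : PySem.Int.mod (p + ((n : Int) + 1)) d = 0
    · rw [if_pos h]; rw [if_pos h] at hcnt
      simp only [Prod.mk.injEq]
      exact ⟨by linarith, trivial⟩
    · rw [if_neg h]; rw [if_neg h] at hcnt
      simp only [Prod.mk.injEq]
      exact ⟨by linarith, trivial⟩

-- the unit-tick loop, moving left: counts floor((n-p)/d) - floor((-p)/d), ends at (p-n) mod d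
theorem pv_ticksL (d : Int) (hd : 0 < d) :
    ∀ (n : Nat) (c p : Int), 0 ≤ p → p < d →
      (List.range n).foldl (fun (st : Int × Int) _ =>
          let q := PySem.Int.mod (st.2 + (-1)) d
          (if q = 0 then st.1 + 1 else st.1, q)) (c, p)
        = (c + (PySem.Int.floordiv ((n : Int) - p) d - PySem.Int.floordiv (-p) d),
           PySem.Int.mod (p - n) d) := by
  intro n
  induction n with
  | zero =>
    intro c p h0 h1
    simp [pv_mod_small d hd p h0 h1]
  | succ n ih =>
    intro c p h0 h1
    rw [List.range_succ, List.foldl_append, ih c p h0 h1]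
    simp only [List.foldl_cons, List.foldl_nil]
    have hc : ((n + 1 : Nat) : Int) = (n : Int) + 1 := by push_cast; ring
    rw [hc]
    have hmod : PySem.Int.mod (PySem.Int.mod (p - n) d + (-1)) d
        = PySem.Int.mod (p - ((n : Int) + 1)) d := by
      have h := PySem.Int.floordiv_mul_add_mod (p - n) d
      rw [show PySem.Int.mod (p - (n : Int)) d + (-1)
            = (p - ((n : Int) + 1)) + (-(PySem.Int.floordiv (p - n) d)) * d by linarith,
          pv_mod_shift d hd]
    have hneg : (PySem.Int.mod (p - ((n : Int) + 1)) d = 0)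
        ↔ (PySem.Int.mod (((n : Int) + 1) - p) d = 0) := by
      rw [pv_mod_zero_neg d hd, show -(p - ((n : Int) + 1)) = ((n : Int) + 1) - p by ring]
    have hcnt := pv_ind d hd (((n : Int) + 1) - p)
    rw [show ((n : Int) + 1) - p - 1 = (n : Int) - p by ring] at hcnt
    rw [hmod]
    by_cases h : PySem.Int.mod (p - ((n : Int) + 1)) d = 0
    · rw [if_pos h]; rw [if_pos (hneg.mp h)] at hcnt
      simp only [Prod.mk.injEq]
      exact ⟨by linarith, trivial⟩
    · rw [if_neg h]; rw [if_neg (fun hh => h (hneg.mpr hh))] at hcnt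
      simp only [Prod.mk.injEq]
      exact ⟨by linarith, trivial⟩

-- loop invariant: from A-state (pA, c, u) and matching B-state (c, u mod d), equal final counts
theorem pv_loop (d : Int) (hd : 0 < d) (moves : List String)
    (hmv : ∀ m ∈ moves, 0 ≤ (PySem.Int.ofStr? (PySem.Str.slice m (some 1) none)).getD (-1)) :
    ∀ (pA c u : Int),
      ((moves.foldl (fun (st : Int × Int × Int) instr =>
          let steps := (PySem.Int.ofStr? (PySem.Str.slice instr (some 1) none)).getD 0
          if PySem.Str.pyGet? instr 0 = some 'R' then
            let uu := st.2.2 + steps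
            (PySem.Int.mod uu d,
             st.2.1 + (PySem.Int.floordiv uu d - PySem.Int.floordiv (uu - steps) d),
             uu)
          else
            let uu := st.2.2 - steps
            let prev_cycle := PySem.Int.floordiv (uu + steps + (d - 1)) d
            let new_cycle := PySem.Int.floordiv (uu + (d - 1)) d
            (PySem.Int.mod uu d, st.2.1 + (prev_cycle - new_cycle), uu))
        (pA, c, u)).2.1)
      =
      ((moves.foldl (fun (st : Int × Int) instr =>
          let steps := (PySem.Int.ofStr? (PySem.Str.slice instr (some 1) none)).getD 0
          let delta : Int := if PySem.Str.pyGet? instr 0 = some 'R' then 1 else -1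
          (List.range steps.toNat).foldl (fun (st : Int × Int) _ =>
              let q := PySem.Int.mod (st.2 + delta) d
              (if q = 0 then st.1 + 1 else st.1, q)) st)
        (c, PySem.Int.mod u d)).1) := by
  induction moves with
  | nil => intro pA c u; rfl
  | cons m rest ih =>
    intro pA c u
    have hm := hmv m (List.mem_cons_self ..)
    have hrest : ∀ m' ∈ rest, 0 ≤ (PySem.Int.ofStr? (PySem.Str.slice m' (some 1) none)).getD (-1) :=
      fun m' hm' => hmv m' (List.mem_cons_of_mem _ hm')
    simp only [List.foldl_cons]
    set s := (PySem.Int.ofStr? (PySem.Str.slice m (some 1) none)).getD 0 with hs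
    have hs0 : 0 ≤ s := by
      rw [hs]
      cases hof : PySem.Int.ofStr? (PySem.Str.slice m (some 1) none) with
      | none => rw [hof] at hm; norm_num at hm
      | some v => rw [hof] at hm; simpa using hm
    have hsn : ((s.toNat : Int)) = s := Int.toNat_of_nonneg hs0
    have hq := PySem.Int.floordiv_mul_add_mod u d
    set q := PySem.Int.floordiv u d with hqdef
    set p := PySem.Int.mod u d with hpdef
    have hp0 : 0 ≤ p := PySem.Int.mod_nonneg u hd
    have hp1 : p < d := PySem.Int.mod_lt u hd
    have hup : u = p + q * d := by linarith
    by_cases hR : PySem.Str.pyGet? m 0 = some 'R'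
    · simp only [hR, if_pos]
      rw [pv_ticksR d hd s.toNat c p hp0 hp1]
      have e1 : PySem.Int.mod (p + (s.toNat : Int)) d = PySem.Int.mod (u + s) d := by
        rw [hsn, hup, show p + q * d + s = (p + s) + q * d by ring, pv_mod_shift d hd]
      have f1 : PySem.Int.floordiv (u + s) d = PySem.Int.floordiv (p + s) d + q := by
        rw [hup, show p + q * d + s = (p + s) + q * d by ring, pv_fd_shift d hd]
      have f2 : PySem.Int.floordiv (u + s - s) d = q := by
        rw [show u + s - s = u by ring]
      have e2 : c + PySem.Int.floordiv (p + (s.toNat : Int)) d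
          = c + (PySem.Int.floordiv (u + s) d - PySem.Int.floordiv (u + s - s) d) := by
        rw [hsn, f1, f2]; ring
      rw [e1, e2]
      exact ih hrest _ _ (u + s)
    · simp only [hR, if_false]
      rw [pv_ticksL d hd s.toNat c p hp0 hp1]
      have e1 : PySem.Int.mod (p - (s.toNat : Int)) d = PySem.Int.mod (u - s) d := by
        rw [hsn, hup, show p + q * d - s = (p - s) + q * d by ring, pv_mod_shift d hd]
      have c1 : PySem.Int.floordiv (u - s + s + (d - 1)) d = -(PySem.Int.floordiv (-u) d) := by
        rw [show u - s + s + (d - 1) = u + d - 1 by ring, pv_fd_ceil d hd]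
      have c2 : PySem.Int.floordiv (u - s + (d - 1)) d = -(PySem.Int.floordiv (s - u) d) := by
        rw [show u - s + (d - 1) = (u - s) + d - 1 by ring, pv_fd_ceil d hd,
            show -(u - s) = s - u by ring]
      have d1 : PySem.Int.floordiv (-u) d = PySem.Int.floordiv (-p) d - q := by
        rw [hup, show -(p + q * d) = -p + (-q) * d by ring, pv_fd_shift d hd]; ring
      have d2 : PySem.Int.floordiv (s - u) d = PySem.Int.floordiv (s - p) d - q := by
        rw [hup, show s - (p + q * d) = (s - p) + (-q) * d by ring, pv_fd_shift d hd]; ring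
      have e2 : c + (PySem.Int.floordiv ((s.toNat : Int) - p) d - PySem.Int.floordiv (-p) d)
          = c + (PySem.Int.floordiv (u - s + s + (d - 1)) d
                 - PySem.Int.floordiv (u - s + (d - 1)) d) := by
        rw [hsn, c1, c2, d1, d2]; ring
      rw [e1, e2]
      exact ih hrest _ _ (u - s)

-- ===== VERDICT (by name: the statement is the Claim_ definition above) =====
theorem part2_spec : Claim_equal_part2 := by
  intro moves start dial_size _hDom hPre
  unfold Spec_part2 part2 part2_alt
  exact pv_loop dial_size hPre.1 moves hPre.2 start 0 start
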